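-- pv_equiv track=rewrite | github.com/Melodiz/CodeRun | Algorithms/Easy/219_adventure_time/adventure_time.py | find_best_trip
-- ===== SOURCE A (Python) =====
-- def find_best_trip(temperatures):
--     if not temperatures:
--         return 0, 0, 0
--
--     n = len(temperatures)
--     max_increase = 0
--     best_start = 0
--     best_end = 0
--
--     # For each possible end day
--     min_temp_idx = 0
--
--     for end in range(1, n):
--         # Update the minimum temperature index if needed
--         if temperatures[end - 1] < temperatures[min_temp_idx]:
--             min_temp_idx = end - 1
--
--         # Calculate increase from current minimum to current end
--         increase = temperatures[end] - temperatures[min_temp_idx]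
--
--         # If we found a better increase
--         if increase > max_increase:
--             max_increase = increase
--             best_start = min_temp_idx
--             best_end = end
--         # If we found the same increase
--         elif increase == max_increase:
--             current_duration = best_end - best_start
--             new_duration = end - min_temp_idx
--
--             # Choose the shorter trip
--             if new_duration < current_duration:
--                 best_start = min_temp_idx
--                 best_end = end
--             # If same duration, choose the one with earlier end date
--             elif new_duration == current_duration and end < best_end:
--                 best_start = min_temp_idx
--                 best_end = end
--
--     return max_increase, best_start, best_end
-- ===== SOURCE B (Python) =====
-- def find_best_trip(temperatures):
--     n = len(temperatures)
--     if n == 0: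
--         return 0, 0, 0
--     # pm[i] = earliest index of the minimum temperature among days 0..i
--     pm = [0]
--     for i in range(1, n):
--         pm.append(i if temperatures[i] < temperatures[pm[i - 1]] else pm[i - 1])
--     candidates = [(temperatures[e] - temperatures[pm[e - 1]], pm[e - 1], e)
--                   for e in range(1, n)]
--     return min([(0, 0, 0)] + candidates,
--                key=lambda c: (-c[0], c[2] - c[1], c[2]))
-- ===== Notes on version B (the rewrite author's own statement) =====
-- stated objective: alternative
-- what changed: Replaces A's single online scan with hand-written tie-break branches by a two-phase computation: a prefix earliest-minimum-index array, an explicit candidate list, and one min-by-key selection on the key (-increase, duration, end) seeded with the zero sentinel candidate.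
import Mathlib
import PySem

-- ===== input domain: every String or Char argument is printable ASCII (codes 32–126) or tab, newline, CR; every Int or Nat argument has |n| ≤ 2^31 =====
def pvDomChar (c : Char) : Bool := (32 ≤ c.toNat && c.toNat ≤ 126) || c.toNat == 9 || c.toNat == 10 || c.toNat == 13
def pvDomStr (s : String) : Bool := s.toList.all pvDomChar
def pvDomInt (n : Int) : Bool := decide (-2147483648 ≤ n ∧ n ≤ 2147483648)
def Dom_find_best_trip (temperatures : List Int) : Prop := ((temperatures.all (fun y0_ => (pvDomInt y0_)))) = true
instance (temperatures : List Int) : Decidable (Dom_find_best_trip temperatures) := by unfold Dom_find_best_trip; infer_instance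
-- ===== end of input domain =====

-- B recomputes the answer from a prefix-minimum-index array and a single min-by-key selection
-- instead of A's online scan with hand-written tie-break branches; same O(n) cost (objective: alternative).

-- ===== PORT A =====
-- loop body of A's 'for end in range(1, n)' (state: (min_temp_idx, max_increase, best_start, best_end))
def pvStepA (T : List Int) (st : Int × Int × Int × Int) (e : Int) : Int × Int × Int × Int :=
  let mi := if PySem.List.pyGetD T (e - 1) 0 < PySem.List.pyGetD T st.1 0 then e - 1 else st.1
  let inc := PySem.List.pyGetD T e 0 - PySem.List.pyGetD T mi 0
  if inc > st.2.1 then (mi, inc, mi, e)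
  else if inc = st.2.1 then
    if e - mi < st.2.2.2 - st.2.2.1 then (mi, st.2.1, mi, e)
    else if e - mi = st.2.2.2 - st.2.2.1 ∧ e < st.2.2.2 then (mi, st.2.1, mi, e)
    else (mi, st.2.1, st.2.2.1, st.2.2.2)
  else (mi, st.2.1, st.2.2.1, st.2.2.2)

-- all list indices A uses are in range, so pyGetD with default 0 is exact
def find_best_trip (temperatures : List Int) : Int × Int × Int :=
  if temperatures = [] then (0, 0, 0)
  else
    let n : Int := temperatures.length
    let st := (PySem.List.pyRange 1 n).foldl (pvStepA temperatures) (0, 0, 0, 0)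
    (st.2.1, st.2.2.1, st.2.2.2)

-- ===== PORT B =====
-- Python tuple '<' on the key (-inc, end - start, end): lexicographic compare, ported by hand (exact)
def pvKeyLt (c b : Int × Int × Int) : Bool :=
  decide (-c.1 < -b.1 ∨ (-c.1 = -b.1 ∧
    (c.2.2 - c.2.1 < b.2.2 - b.2.1 ∨ (c.2.2 - c.2.1 = b.2.2 - b.2.1 ∧ c.2.2 < b.2.2))))

-- loop body of B's pm-building loop ('pm.append(...)')
def pvStepPm (T : List Int) (pm : List Int) (i : Int) : List Int :=
  pm ++ [if PySem.List.pyGetD T i 0 < PySem.List.pyGetD T (PySem.List.pyGetD pm (i - 1) 0) 0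
         then i else PySem.List.pyGetD pm (i - 1) 0]

-- min(xs, key=k) is the first element whose key no later element strictly undercuts:
-- ported as a left fold keeping the incumbent on ties (exact for Python's min)
def find_best_trip_alt (temperatures : List Int) : Int × Int × Int :=
  let n : Int := temperatures.length
  if n = 0 then (0, 0, 0)
  else
    let pm := (PySem.List.pyRange 1 n).foldl (pvStepPm temperatures) [0]
    let cands := (PySem.List.pyRange 1 n).map (fun (e : Int) =>
      let s := PySem.List.pyGetD pm (e - 1) 0
      (PySem.List.pyGetD temperatures e 0 - PySem.List.pyGetD temperatures s 0, s, e))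
    cands.foldl (fun best c => if pvKeyLt c best then c else best) (0, 0, 0)

-- ===== PRECONDITION & SPEC =====
def Spec_find_best_trip (temperatures : List Int) (out : Int × Int × Int) : Prop := out = find_best_trip_alt temperatures
instance (temperatures : List Int) (out : Int × Int × Int) : Decidable (Spec_find_best_trip temperatures out) := by unfold Spec_find_best_trip; infer_instance

-- ===== CLAIM (what is proved, stated in full; the proofs are below) =====
def Claim_equal_find_best_trip : Prop := ∀ (temperatures : List Int), Dom_find_best_trip temperatures → Spec_find_best_trip temperatures (find_best_trip temperatures)

-- ===== LEMMAS AND PROOFS =====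

-- earliest index of the minimum of T[0..j]
def pmIdxF (T : List Int) : Nat → Int
  | 0 => 0
  | j + 1 => if PySem.List.pyGetD T ((j : Int) + 1) 0 < PySem.List.pyGetD T (pmIdxF T j) 0
             then (j : Int) + 1 else pmIdxF T j

-- the candidate trip ending at day e, starting at the earliest prefix minimum
def candF (T : List Int) (e : Int) : Int × Int × Int :=
  (PySem.List.pyGetD T e 0 - PySem.List.pyGetD T (pmIdxF T (e - 1).toNat) 0,
   pmIdxF T (e - 1).toNat, e)

def selStep (b c : Int × Int × Int) : Int × Int × Int := if pvKeyLt c b then c else b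

-- A's update of min_temp_idx at iteration e
def pmNext (T : List Int) (mi e : Int) : Int :=
  if PySem.List.pyGetD T (e - 1) 0 < PySem.List.pyGetD T mi 0 then e - 1 else mi

lemma stepA_eq (T : List Int) (st : Int × Int × Int × Int) (e : Int) :
    pvStepA T st e =
      (pmNext T st.1 e,
       selStep st.2 (PySem.List.pyGetD T e 0 - PySem.List.pyGetD T (pmNext T st.1 e) 0,
                     pmNext T st.1 e, e)) := by
  obtain ⟨mi, inc, bs, be⟩ := st
  simp only [pvStepA, pmNext, selStep, pvKeyLt]
  split_ifs <;> simp_all <;> omega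

lemma pmNext_pmIdxF (T : List Int) (j : Nat) :
    pmNext T (pmIdxF T (j - 1)) ((j : Int) + 1) = pmIdxF T j := by
  cases j with
  | zero =>
      simp only [pmNext, pmIdxF]
      norm_num
  | succ m =>
      simp only [pmNext, pmIdxF]
      have h1 : ((m + 1 : Nat) : Int) + 1 - 1 = (m : Int) + 1 := by push_cast; ring
      have h2 : ((m + 1 : Nat) : Int) = (m : Int) + 1 := by push_cast; ring
      rw [h1, Nat.add_sub_cancel]

lemma foldA_eq (T : List Int) (j : Nat) :
    (PySem.List.pyRange 1 ((j : Int) + 1)).foldl (pvStepA T) (0, 0, 0, 0) =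
      (pmIdxF T (j - 1),
       ((PySem.List.pyRange 1 ((j : Int) + 1)).map (candF T)).foldl selStep (0, 0, 0)) := by
  induction j with
  | zero =>
      norm_num
      rfl
  | succ j ih =>
      have hle : (1 : Int) ≤ (j : Int) + 1 := by omega
      have hcast : ((j + 1 : Nat) : Int) + 1 = ((j : Int) + 1) + 1 := by push_cast; ring
      rw [hcast, PySem.List.pyRange_one_succ_right hle, List.foldl_append, List.map_append,
          List.foldl_append, ih]
      simp only [List.foldl_cons, List.foldl_nil]
      rw [stepA_eq, pmNext_pmIdxF]
      have he : ((j : Int) + 1 - 1).toNat = j := by omega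
      simp only [List.map_cons, List.map_nil, List.foldl_cons, List.foldl_nil, candF, he,
        Nat.add_sub_cancel]

lemma foldPm_eq (T : List Int) (j : Nat) :
    (PySem.List.pyRange 1 ((j : Int) + 1)).foldl (pvStepPm T) [0] =
      (List.range (j + 1)).map (pmIdxF T) := by
  induction j with
  | zero =>
      norm_num
      rfl
  | succ j ih =>
      have hle : (1 : Int) ≤ (j : Int) + 1 := by omega
      have hcast : ((j + 1 : Nat) : Int) + 1 = ((j : Int) + 1) + 1 := by push_cast; ring
      rw [hcast, PySem.List.pyRange_one_succ_right hle, List.foldl_append, ih]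
      simp only [List.foldl_cons, List.foldl_nil, pvStepPm]
      have h1 : (j : Int) + 1 - 1 = ((j : Nat) : Int) := by ring
      rw [h1, PySem.List.pyGetD_natCast,
          PySem.List.getD_map_range (pmIdxF T) (j + 1) j 0 (by omega)]
      rw [List.range_succ (n := j + 1), List.map_append]
      simp only [List.map_cons, List.map_nil, pmIdxF]

theorem find_best_trip_spec : Claim_equal_find_best_trip := by
  intro T _
  unfold Spec_find_best_trip
  cases T with
  | nil => rfl
  | cons h t =>
      have hne : ¬((t.length : Int) + 1 = 0) := by omega
      simp only [find_best_trip, find_best_trip_alt, List.cons_ne_nil, if_false,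
        List.length_cons, Nat.cast_add, Nat.cast_one, if_neg hne]
      rw [foldA_eq, foldPm_eq]
      have hmap :
          (PySem.List.pyRange 1 ((t.length : Int) + 1)).map (fun (e : Int) =>
            (PySem.List.pyGetD (h :: t) e 0 -
               PySem.List.pyGetD (h :: t)
                 (PySem.List.pyGetD ((List.range (t.length + 1)).map (pmIdxF (h :: t))) (e - 1) 0) 0,
             PySem.List.pyGetD ((List.range (t.length + 1)).map (pmIdxF (h :: t))) (e - 1) 0, e)) =
          (PySem.List.pyRange 1 ((t.length : Int) + 1)).map (candF (h :: t)) := by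
        apply List.map_congr_left
        intro e he
        rw [PySem.List.mem_pyRange_one] at he
        have h1 : e - 1 = (((e - 1).toNat : Nat) : Int) := by omega
        have h2 : (e - 1).toNat < t.length + 1 := by omega
        rw [h1, PySem.List.pyGetD_natCast,
            PySem.List.getD_map_range (pmIdxF (h :: t)) (t.length + 1) (e - 1).toNat 0 h2]
        simp [candF]
      rw [hmap]
      rfl
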